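-- pv_equiv track=rewrite | github.com/oceanleeoff/code_test- | 프로그래머스/0/120883. 로그인 성공？/로그인 성공？.py | solution
-- ===== SOURCE A (Python) =====
-- def solution(id_pw, db):
--     result = []
--     user_id, user_pw = id_pw[0], id_pw[1]
--
--     for i in range(len(db)) :
--         if db[i][0] != user_id :
--             result.append('fail')
--         elif db[i][1] != user_pw :
--             result.append('wrong pw')
--         else :
--             result.append('login')
--
--     if 'login' in result :
--         return 'login'
--     elif 'wrong pw' in result :
--         return 'wrong pw'
--     else :
--         return 'fail'
-- ===== SOURCE B (Python) =====
-- def solution(id_pw, db):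
--     pws = [e[1] for e in db if e[0] == id_pw[0]]
--     if id_pw[1] in pws:
--         return 'login'
--     elif pws:
--         return 'wrong pw'
--     else:
--         return 'fail'
-- ===== Notes on version B (the rewrite author's own statement) =====
-- stated objective: simpler
-- what changed: Replaces the per-entry three-way classification list plus priority membership aggregation with a project-then-test decomposition: one filtered list of the passwords of entries whose id matches, then login/wrong pw/fail decided by membership and non-emptiness of that list.
import Mathlib
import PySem

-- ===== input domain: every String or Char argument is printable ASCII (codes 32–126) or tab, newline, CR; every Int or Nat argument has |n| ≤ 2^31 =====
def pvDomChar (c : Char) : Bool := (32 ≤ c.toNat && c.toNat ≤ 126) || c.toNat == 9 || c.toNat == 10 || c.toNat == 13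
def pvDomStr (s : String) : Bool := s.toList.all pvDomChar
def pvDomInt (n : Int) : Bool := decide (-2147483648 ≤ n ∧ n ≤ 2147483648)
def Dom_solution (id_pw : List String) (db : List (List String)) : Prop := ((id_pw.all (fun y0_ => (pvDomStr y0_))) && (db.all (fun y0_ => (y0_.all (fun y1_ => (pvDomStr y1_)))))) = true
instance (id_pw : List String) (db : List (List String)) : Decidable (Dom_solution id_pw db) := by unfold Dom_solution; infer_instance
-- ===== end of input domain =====

-- B replaces A's per-entry classification list plus priority membership aggregation with a
-- project-then-test decomposition (objective: simpler, same O(n) cost).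

-- ===== PORT A =====
def solution (id_pw : List String) (db : List (List String)) : String :=
  let user_id := PySem.List.pyGetD id_pw 0 ""
  let user_pw := PySem.List.pyGetD id_pw 1 ""
  let result := (PySem.List.pyRange 0 (db.length : Int) 1).foldl (fun acc i =>
    if PySem.List.pyGetD (PySem.List.pyGetD db i []) 0 "" ≠ user_id then acc ++ ["fail"]
    else if PySem.List.pyGetD (PySem.List.pyGetD db i []) 1 "" ≠ user_pw then acc ++ ["wrong pw"]
    else acc ++ ["login"]) ([] : List String)
  if "login" ∈ result then "login"
  else if "wrong pw" ∈ result then "wrong pw"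
  else "fail"

-- ===== PORT B =====
def solution_alt (id_pw : List String) (db : List (List String)) : String :=
  let pws := (db.filter (fun e => PySem.List.pyGetD e 0 "" = PySem.List.pyGetD id_pw 0 "")).map
               (fun e => PySem.List.pyGetD e 1 "")
  if PySem.List.pyGetD id_pw 1 "" ∈ pws then "login"
  else if pws ≠ [] then "wrong pw"
  else "fail"

-- ===== PRECONDITION & SPEC =====
-- Pre_ excludes exactly the inputs where the Python A raises IndexError: id_pw shorter than 2,
-- an empty db row (db[i][0]), or a row whose first field matches the id but has no second field (db[i][1]).
def Pre_solution (id_pw : List String) (db : List (List String)) : Prop :=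
  2 ≤ id_pw.length ∧ ∀ e ∈ db, e ≠ [] ∧ (e.getD 0 "" = id_pw.getD 0 "" → 2 ≤ e.length)
instance (id_pw : List String) (db : List (List String)) : Decidable (Pre_solution id_pw db) := by unfold Pre_solution; infer_instance
def pvWitness_solution : List String × List (List String) :=
  (["meosseugi", "1234"], [["rardss", "123"], ["meosseugi", "1234"], ["institute", "abcd"]])

def Spec_solution (id_pw : List String) (db : List (List String)) (out : String) : Prop := out = solution_alt id_pw db
instance (id_pw : List String) (db : List (List String)) (out : String) : Decidable (Spec_solution id_pw db out) := by unfold Spec_solution; infer_instance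

-- ===== CLAIM (what is proved, stated in full; the proofs are below) =====
def Claim_equal_solution : Prop := ∀ (id_pw : List String) (db : List (List String)), Dom_solution id_pw db → Pre_solution id_pw db → Spec_solution id_pw db (solution id_pw db)

-- ===== LEMMAS AND PROOFS =====

-- A's classification of one db row
def pvClassify (uid pw : String) (e : List String) : String :=
  if PySem.List.pyGetD e 0 "" ≠ uid then "fail"
  else if PySem.List.pyGetD e 1 "" ≠ pw then "wrong pw"
  else "login"

-- A's index loop builds exactly the per-row classification list
lemma loop_eq_map (uid pw : String) (db : List (List String)) :
    (PySem.List.pyRange 0 (db.length : Int) 1).foldl (fun acc i =>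
      if PySem.List.pyGetD (PySem.List.pyGetD db i []) 0 "" ≠ uid then acc ++ ["fail"]
      else if PySem.List.pyGetD (PySem.List.pyGetD db i []) 1 "" ≠ pw then acc ++ ["wrong pw"]
      else acc ++ ["login"]) ([] : List String)
    = db.map (pvClassify uid pw) := by
  rw [show (fun (acc : List String) (i : Int) =>
        if PySem.List.pyGetD (PySem.List.pyGetD db i []) 0 "" ≠ uid then acc ++ ["fail"]
        else if PySem.List.pyGetD (PySem.List.pyGetD db i []) 1 "" ≠ pw then acc ++ ["wrong pw"]
        else acc ++ ["login"])
      = (fun (acc : List String) (i : Int) => acc ++ [pvClassify uid pw (PySem.List.pyGetD db i [])]) from by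
    funext acc i; simp only [pvClassify]; split_ifs <;> rfl]
  have h := PySem.List.foldl_pyRange_zero_pyGetD db ([] : List String)
    (fun acc e => acc ++ [pvClassify uid pw e]) ([] : List String)
  rw [show PySem.List.len db = (db.length : Int) from by simp [PySem.List.len]] at h
  rw [h, PySem.List.foldl_append_singleton_eq_map]
  simp

-- "login" appears in the classification list iff pw is among the matching rows' passwords
lemma login_mem_iff (uid pw : String) (db : List (List String)) :
    "login" ∈ db.map (pvClassify uid pw) ↔
      pw ∈ (db.filter (fun e => PySem.List.pyGetD e 0 "" = uid)).map (fun e => PySem.List.pyGetD e 1 "") := by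
  induction db with
  | nil => simp
  | cons e db ih =>
    by_cases h0 : PySem.List.pyGetD e 0 "" = uid
    · by_cases h1 : PySem.List.pyGetD e 1 "" = pw
      · simp [pvClassify, h0, h1]
      · simp [pvClassify, h0, h1, ih]
        intro h; exact absurd h.symm h1
    · simp [pvClassify, h0, ih]

-- "wrong pw" appears iff some row matches the id with a different password
lemma wrongpw_mem_iff (uid pw : String) (db : List (List String)) :
    "wrong pw" ∈ db.map (pvClassify uid pw) ↔
      ∃ e ∈ db, PySem.List.pyGetD e 0 "" = uid ∧ PySem.List.pyGetD e 1 "" ≠ pw := by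
  induction db with
  | nil => simp
  | cons e db ih =>
    by_cases h0 : PySem.List.pyGetD e 0 "" = uid
    · by_cases h1 : PySem.List.pyGetD e 1 "" = pw
      · simp [pvClassify, h0, h1, ih]
      · simp [pvClassify, h0, h1]
    · simp [pvClassify, h0, ih]

-- ===== VERDICT (by name: the statement is the Claim_ definition above) =====
theorem solution_spec : Claim_equal_solution := by
  intro id_pw db _ _
  show solution id_pw db = solution_alt id_pw db
  unfold solution solution_alt
  dsimp only
  rw [loop_eq_map (PySem.List.pyGetD id_pw 0 "") (PySem.List.pyGetD id_pw 1 "") db]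
  set uid := PySem.List.pyGetD id_pw 0 "" with huid
  set pw := PySem.List.pyGetD id_pw 1 "" with hpw
  by_cases hlog : "login" ∈ db.map (pvClassify uid pw)
  · rw [if_pos hlog, if_pos ((login_mem_iff uid pw db).mp hlog)]
  · rw [if_neg hlog, if_neg (fun h => hlog ((login_mem_iff uid pw db).mpr h))]
    by_cases hwr : "wrong pw" ∈ db.map (pvClassify uid pw)
    · rw [if_pos hwr]
      obtain ⟨e, he, h0, h1⟩ := (wrongpw_mem_iff uid pw db).mp hwr
      rw [if_pos]
      simp only [ne_eq, List.map_eq_nil_iff, List.filter_eq_nil_iff]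
      push Not
      exact ⟨e, he, by simpa using h0⟩
    · rw [if_neg hwr, if_neg]
      simp only [ne_eq, List.map_eq_nil_iff, List.filter_eq_nil_iff, not_not]
      intro e he h0
      exact absurd ((login_mem_iff uid pw db).mpr (List.mem_map.mpr
        ⟨e, List.mem_filter.mpr ⟨he, by simpa using h0⟩, by
          by_contra h1
          exact hwr ((wrongpw_mem_iff uid pw db).mpr ⟨e, he, by simpa using h0, h1⟩)⟩)) hlog
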